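-- pv_equiv track=rewrite | github.com/pypi-data/pypi-mirror-256 | packages/hyload/hyload-0.3.0-py3-none-any.whl/hyload/tools/puttyagents.py | _specialStripRight
-- ===== SOURCE A (Python) =====
-- def _specialStripRight(srcStr):
--     totalLen = len(srcStr)
--     idx = totalLen - 1
--     while idx >= 0:
--         if ord(srcStr[idx]) <= 0x20: # it is a invisible char
--             idx -= 1
--         else:
--             break
--
--     return srcStr[:idx+1]
-- ===== SOURCE B (Python) =====
-- def _specialStripRight(srcStr):
--     cut = 0
--     for i in range(len(srcStr)):
--         if ord(srcStr[i]) > 0x20: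
--             cut = i + 1
--     return srcStr[:cut]
-- ===== Notes on version B (the rewrite author's own statement) =====
-- stated objective: alternative
-- what changed: Replaces the right-to-left early-stopping while-loop (decrement idx from the end until a significant char) with a single left-to-right pass that maintains a running cut position, set to i+1 whenever char i has code above 0x20.
import Mathlib
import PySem

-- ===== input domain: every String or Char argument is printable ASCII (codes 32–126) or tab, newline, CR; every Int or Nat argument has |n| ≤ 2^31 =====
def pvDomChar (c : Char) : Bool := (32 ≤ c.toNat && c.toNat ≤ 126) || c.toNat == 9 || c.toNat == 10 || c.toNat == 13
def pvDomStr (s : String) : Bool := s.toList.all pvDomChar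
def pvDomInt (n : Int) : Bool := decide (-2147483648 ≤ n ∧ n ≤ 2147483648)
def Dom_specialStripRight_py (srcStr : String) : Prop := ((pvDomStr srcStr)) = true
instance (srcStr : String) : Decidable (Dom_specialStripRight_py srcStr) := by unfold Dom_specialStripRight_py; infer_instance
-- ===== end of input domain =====

-- B replaces A's right-to-left early-stopping scan by a single forward pass
-- maintaining the running cut position (one past the last char with ord > 0x20);
-- same cost, different decomposition.


-- ===== PORT A =====
-- A's while-loop: the current idx is k - 1; returns the final value of idx.
def pvALoop (s : List Char) : Nat → Int
  | 0 => -1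
  | k + 1 =>
    match PySem.List.pyGet? s (k : Int) with
    | some c => if c.toNat ≤ 0x20 then pvALoop s k else (k : Int)
    | none => (k : Int)   -- unreachable: idx stays within bounds

def specialStripRight_py (srcStr : String) : String :=
  let s := srcStr.toList
  let idx := pvALoop s s.length        -- totalLen - 1 is the starting idx, i.e. k = totalLen
  String.ofList (PySem.List.slice s none (some (idx + 1)))

-- ===== PORT B =====
-- B's forward loop: cut = one past the last index with ord > 0x20 seen so far.
def pvBCut (s : List Char) : Int :=
  (PySem.List.pyRange 0 s.length).foldl
    (fun cut i => if 0x20 < (PySem.List.pyGetD s i ' ').toNat then i + 1 else cut) 0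

def specialStripRight_py_alt (srcStr : String) : String :=
  let s := srcStr.toList
  String.ofList (PySem.List.slice s none (some (pvBCut s)))

-- ===== PRECONDITION & SPEC =====
def Spec_specialStripRight_py (srcStr : String) (out : String) : Prop := out = specialStripRight_py_alt srcStr
instance (srcStr : String) (out : String) : Decidable (Spec_specialStripRight_py srcStr out) := by unfold Spec_specialStripRight_py; infer_instance

-- ===== CLAIM (what is proved, stated in full; the proofs are below) =====
def Claim_equal_specialStripRight_py : Prop := ∀ (srcStr : String), Dom_specialStripRight_py srcStr → Spec_specialStripRight_py srcStr (specialStripRight_py srcStr)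

-- ===== LEMMAS AND PROOFS =====

theorem pvALoop_lt (s : List Char) (k : Nat) : pvALoop s k < (k : Int) := by
  induction k with
  | zero => simp [pvALoop]
  | succ k ih =>
    cases hg : PySem.List.pyGet? s (k : Int) with
    | none => simp only [pvALoop, hg]; omega
    | some c =>
      simp only [pvALoop, hg]
      by_cases h : c.toNat ≤ 0x20 <;> simp [h] <;> omega

theorem pvALoop_ge (s : List Char) (k : Nat) : -1 ≤ pvALoop s k := by
  induction k with
  | zero => simp [pvALoop]
  | succ k ih =>
    cases hg : PySem.List.pyGet? s (k : Int) with
    | none => simp only [pvALoop, hg]; omega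
    | some c =>
      simp only [pvALoop, hg]
      by_cases h : c.toNat ≤ 0x20 <;> simp [h] <;> omega

theorem pvALoop_append (l : List Char) (c : Char) (k : Nat) (hk : k ≤ l.length) :
    pvALoop (l ++ [c]) k = pvALoop l k := by
  induction k with
  | zero => rfl
  | succ k ih =>
    have hget : PySem.List.pyGet? (l ++ [c]) (k : Int) = PySem.List.pyGet? l (k : Int) := by
      rw [PySem.List.pyGet?_natCast, PySem.List.pyGet?_natCast,
        List.getElem?_append_left (by omega)]
    simp only [pvALoop, hget, ih (by omega)]

theorem pvALoop_last (l : List Char) (c : Char) :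
    pvALoop (l ++ [c]) (l.length + 1) =
      if c.toNat ≤ 0x20 then pvALoop l l.length else (l.length : Int) := by
  have hget : PySem.List.pyGet? (l ++ [c]) ((l.length : Nat) : Int) = some c :=
    PySem.List.pyGet?_append_length l [] c
  simp only [pvALoop, hget, pvALoop_append l c l.length (le_refl _)]

theorem pvBCut_append (l : List Char) (c : Char) :
    pvBCut (l ++ [c]) = if 0x20 < c.toNat then (l.length : Int) + 1 else pvBCut l := by
  have hlen : ((l ++ [c]).length : Int) = (l.length : Int) + 1 := by simp
  have hrange : PySem.List.pyRange 0 ((l ++ [c]).length : Int) =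
      PySem.List.pyRange 0 (l.length : Int) ++ [(l.length : Int)] := by
    rw [hlen, PySem.List.pyRange_one_succ_right (by positivity)]
  have hcongr : ∀ (r : List Int) (init : Int), (∀ i ∈ r, 0 ≤ i ∧ i < (l.length : Int)) →
      r.foldl (fun cut i => if 0x20 < (PySem.List.pyGetD (l ++ [c]) i ' ').toNat then i + 1 else cut) init
      = r.foldl (fun cut i => if 0x20 < (PySem.List.pyGetD l i ' ').toNat then i + 1 else cut) init := by
    intro r
    induction r with
    | nil => intro init _; rfl
    | cons x xs ih =>
      intro init hmem
      obtain ⟨hx0, hxlt⟩ := hmem x (List.mem_cons_self ..)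
      have hg : PySem.List.pyGetD (l ++ [c]) x ' ' = PySem.List.pyGetD l x ' ' := by
        rw [PySem.List.pyGetD_eq_getElem _ _ hx0 (by simp; omega),
          PySem.List.pyGetD_eq_getElem _ _ hx0 hxlt,
          List.getElem_append_left (by omega)]
      simp only [List.foldl_cons, hg]
      exact ih _ (fun i hi => hmem i (List.mem_cons_of_mem _ hi))
  have hlast : PySem.List.pyGetD (l ++ [c]) ((l.length : Nat) : Int) ' ' = c := by
    rw [PySem.List.pyGetD_eq_getElem _ _ (by positivity) (by simp)]
    simp
  unfold pvBCut
  rw [hrange, List.foldl_append]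
  simp only [List.foldl_cons, List.foldl_nil, hlast]
  rw [hcongr _ _ (by intro i hi; have := (PySem.List.mem_pyRange_one).1 hi; exact this)]

theorem pvBCut_bounds (l : List Char) : 0 ≤ pvBCut l ∧ pvBCut l ≤ (l.length : Int) := by
  induction l using List.reverseRecOn with
  | nil => constructor <;> decide
  | append_singleton l c ih =>
    rw [pvBCut_append]
    by_cases h : 0x20 < c.toNat <;> simp [h] <;> omega

theorem pv_main (l : List Char) :
    PySem.List.slice l none (some (pvALoop l l.length + 1)) =
      PySem.List.slice l none (some (pvBCut l)) := by
  induction l using List.reverseRecOn with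
  | nil => decide
  | append_singleton l c ih =>
    have hn : (l ++ [c]).length = l.length + 1 := by simp
    rw [hn, pvALoop_last, pvBCut_append]
    by_cases h : 0x20 < c.toNat
    · -- last char significant: both keep everything
      have h' : ¬ c.toNat ≤ 0x20 := by omega
      simp only [h, h', if_true, if_false]
    · have h' : c.toNat ≤ 0x20 := by omega
      simp only [h, h', if_true, if_false]
      have ha0 : 0 ≤ pvALoop l l.length + 1 := by have := pvALoop_ge l l.length; omega
      have halt : pvALoop l l.length + 1 ≤ (l.length : Int) := by
        have := pvALoop_lt l l.length; omega
      obtain ⟨hb0, hblt⟩ := pvBCut_bounds l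
      rw [PySem.List.slice_to _ ha0, PySem.List.slice_to _ hb0,
        List.take_append_of_le_length (by omega), List.take_append_of_le_length (by omega),
        ← PySem.List.slice_to l ha0, ← PySem.List.slice_to l hb0]
      exact ih

-- ===== VERDICT (by name: the statement is the Claim_ definition above) =====
theorem specialStripRight_py_spec : Claim_equal_specialStripRight_py := by
  intro srcStr _
  unfold Spec_specialStripRight_py specialStripRight_py specialStripRight_py_alt
  exact congrArg String.ofList (pv_main srcStr.toList)
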